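-- pv_equiv track=rewrite | github.com/sebawoz02/JFTTCompiler | algorithms.py | reach_target_number
-- ===== SOURCE A (Python) =====
-- def reach_target_number(x):
--     operations = []
--
--     while x != 1:
--         if x % 2 == 0:
--             x //= 2
--             operations.append("SHL")
--         elif (x - 1) % 4 == 0 or x == 3:
--             x -= 1
--             operations.append("INC")
--         else:
--             x += 1
--             operations.append("DEC")
--
--     return operations[::-1]
-- ===== SOURCE B (Python) =====
-- def _step(x):
--     # one descent move: returns (next value, op name)
--     if x % 2 == 0:
--         return x // 2, "SHL"
--     if (x - 1) % 4 == 0 or x == 3: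
--         return x - 1, "INC"
--     return x + 1, "DEC"
--
--
-- def reach_target_number(x):
--     if x == 1:
--         return []
--     y, op = _step(x)
--     return reach_target_number(y) + [op]
-- ===== Notes on version B (the rewrite author's own statement) =====
-- stated objective: simpler
-- what changed: Replaced the imperative while-loop that accumulates ops into a list and reverses it at the end with a direct recursion on x built from a one-move step helper returning (next value, op); placing each op after the recursive call makes the reversed order fall out with no accumulator or [::-1]. Pre_ excludes x <= 0, where A's loop never terminates.
-- outside the precondition, e.g. on reach_target_number(0): A does not finish within the time limit, B raises RecursionError
import Mathlib
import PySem

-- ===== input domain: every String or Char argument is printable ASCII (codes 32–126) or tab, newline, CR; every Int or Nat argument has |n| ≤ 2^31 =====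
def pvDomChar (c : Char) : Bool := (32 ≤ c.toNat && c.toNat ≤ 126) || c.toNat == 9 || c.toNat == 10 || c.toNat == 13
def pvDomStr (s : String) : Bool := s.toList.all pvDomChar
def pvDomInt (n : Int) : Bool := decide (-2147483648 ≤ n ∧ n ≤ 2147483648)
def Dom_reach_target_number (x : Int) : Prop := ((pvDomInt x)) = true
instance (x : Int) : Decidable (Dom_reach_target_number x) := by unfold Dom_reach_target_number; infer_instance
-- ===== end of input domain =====

-- B replaces the loop+accumulator+reverse with a direct recursion on x via a one-move
-- step helper, the op placed after the recursive call; same asymptotic cost (objective: simpler).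

-- ===== PORT A =====
-- the while-loop, accumulating 'operations'; the fuel (strictly more than the number
-- of loop iterations for every x ≥ 1) only makes the recursion total
def rtnLoop : Nat → Int → List String → List String
  | 0, _, ops => ops
  | n + 1, x, ops =>
    if x = 1 then ops
    else if PySem.Int.mod x 2 = 0 then
      rtnLoop n (PySem.Int.floordiv x 2) (ops ++ ["SHL"])
    else if PySem.Int.mod (x - 1) 4 = 0 ∨ x = 3 then
      rtnLoop n (x - 1) (ops ++ ["INC"])
    else
      rtnLoop n (x + 1) (ops ++ ["DEC"])

def reach_target_number (x : Int) : List String :=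
  (rtnLoop (2 * x + 3).toNat x []).reverse   -- operations[::-1]

-- ===== PORT B =====
-- one descent move: (next value, op name)
def rtnStep (x : Int) : Int × String :=
  if PySem.Int.mod x 2 = 0 then (PySem.Int.floordiv x 2, "SHL")
  else if PySem.Int.mod (x - 1) 4 = 0 ∨ x = 3 then (x - 1, "INC")
  else (x + 1, "DEC")

-- recursion-depth bound for B's recursion (a DEC move raises x by 1 but the result is
-- divisible by 4, so this weighted measure strictly decreases at every step for x ≥ 1);
-- the fuel only makes the recursion total (Python B overflows the stack for x ≤ 0,
-- outside Pre_) and never runs out on x ≥ 1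
def pvMeas (x : Int) : Nat := (2 * x + if PySem.Int.mod x 4 = 3 ∧ x ≠ 3 then 3 else 0).toNat

-- direct recursion, op appended after the recursive call
def rtnDescend : Nat → Int → List String
  | 0, _ => []
  | n + 1, x =>
    if x = 1 then []
    else rtnDescend n (rtnStep x).1 ++ [(rtnStep x).2]

def reach_target_number_alt (x : Int) : List String :=
  rtnDescend (pvMeas x) x

-- ===== PRECONDITION & SPEC =====
-- Pre_ excludes x ≤ 0, where Python A's while-loop never terminates (no value is returned)
def Pre_reach_target_number (x : Int) : Prop := 1 ≤ x
instance (x : Int) : Decidable (Pre_reach_target_number x) := by unfold Pre_reach_target_number; infer_instance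
def pvWitness_reach_target_number : Int := (6)

def Spec_reach_target_number (x : Int) (out : List String) : Prop := out = reach_target_number_alt x
instance (x : Int) (out : List String) : Decidable (Spec_reach_target_number x out) := by unfold Spec_reach_target_number; infer_instance

-- ===== CLAIM (what is proved, stated in full; the proofs are below) =====
def Claim_equal_reach_target_number : Prop := ∀ (x : Int), Dom_reach_target_number x → Pre_reach_target_number x → Spec_reach_target_number x (reach_target_number x)

-- ===== LEMMAS AND PROOFS =====

theorem pvMeas_eq (y : Int) (_hy : 1 ≤ y) :
    pvMeas y = (2 * y + if y % 4 = 3 ∧ y ≠ 3 then 3 else 0).toNat := by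
  unfold pvMeas
  rw [PySem.Int.mod_eq_emod_of_pos (by omega : (0:Int) < 4)]

-- the measure strictly decreases along a step
theorem rtnStep_meas_lt (x : Int) (hx : 1 < x) : pvMeas (rtnStep x).1 < pvMeas x := by
  have h2 : PySem.Int.mod x 2 = x % 2 := PySem.Int.mod_eq_emod_of_pos (by omega)
  have h14 : PySem.Int.mod (x - 1) 4 = (x - 1) % 4 := PySem.Int.mod_eq_emod_of_pos (by omega)
  unfold rtnStep
  by_cases he : PySem.Int.mod x 2 = 0
  · rw [h2] at he
    have hd : PySem.Int.floordiv x 2 = x / 2 := PySem.Int.floordiv_eq_ediv_of_pos (by omega)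
    rw [if_pos (by rw [h2]; exact he), hd,
      pvMeas_eq _ (by omega), pvMeas_eq _ (by omega)]
    split_ifs <;> omega
  · rw [if_neg he]
    rw [h2] at he
    by_cases hb : PySem.Int.mod (x - 1) 4 = 0 ∨ x = 3
    · rw [h14] at hb
      rw [if_pos (by rw [h14]; exact hb),
        pvMeas_eq _ (by omega), pvMeas_eq _ (by omega)]
      split_ifs <;> omega
    · rw [h14] at hb
      rw [if_neg (by rw [h14]; exact hb),
        pvMeas_eq _ (by omega), pvMeas_eq _ (by omega)]
      split_ifs <;> omega

-- the step stays ≥ 1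
theorem rtnStep_pos (x : Int) (hx : 1 < x) : 1 ≤ (rtnStep x).1 := by
  unfold rtnStep
  have h2 : PySem.Int.mod x 2 = x % 2 := PySem.Int.mod_eq_emod_of_pos (by omega)
  have hd : PySem.Int.floordiv x 2 = x / 2 := PySem.Int.floordiv_eq_ediv_of_pos (by omega)
  split_ifs <;> simp only [hd] <;> omega

-- with the SAME fuel, A's loop appends the reverse of B's descent to the accumulator
theorem rtnLoop_eq_rtnDescend : ∀ (n : Nat) (x : Int) (ops : List String),
    rtnLoop n x ops = ops ++ (rtnDescend n x).reverse := by
  intro n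
  induction n with
  | zero => intro x ops; simp [rtnLoop, rtnDescend]
  | succ n ih =>
    intro x ops
    rw [rtnLoop, rtnDescend]
    by_cases h1 : x = 1
    · simp [h1]
    · rw [if_neg h1, if_neg h1]
      unfold rtnStep
      by_cases h2 : PySem.Int.mod x 2 = 0
      · rw [if_pos h2, if_pos h2, ih]; simp
      · rw [if_neg h2, if_neg h2]
        by_cases h3 : PySem.Int.mod (x - 1) 4 = 0 ∨ x = 3
        · rw [if_pos h3, if_pos h3, ih]; simp
        · rw [if_neg h3, if_neg h3, ih]; simp

-- once the fuel reaches the measure, the descent's value no longer depends on the fuel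
theorem rtnDescend_stable : ∀ (m : Nat) (x : Int), 1 ≤ x → pvMeas x ≤ m →
    ∀ (n₁ n₂ : Nat), pvMeas x ≤ n₁ → pvMeas x ≤ n₂ →
      rtnDescend n₁ x = rtnDescend n₂ x := by
  intro m
  induction m with
  | zero =>
    intro x hx hm
    exfalso
    rw [pvMeas_eq x hx] at hm
    split_ifs at hm <;> omega
  | succ m ih =>
    intro x hx hm n₁ n₂ h₁ h₂
    have hmx : 2 ≤ pvMeas x := by rw [pvMeas_eq x hx]; split_ifs <;> omega
    obtain ⟨k₁, rfl⟩ : ∃ k, n₁ = k + 1 := ⟨n₁ - 1, by omega⟩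
    obtain ⟨k₂, rfl⟩ : ∃ k, n₂ = k + 1 := ⟨n₂ - 1, by omega⟩
    rw [rtnDescend, rtnDescend]
    by_cases h1 : x = 1
    · simp [h1]
    · rw [if_neg h1, if_neg h1]
      have hlt := rtnStep_meas_lt x (by omega)
      have hpos := rtnStep_pos x (by omega)
      rw [ih _ hpos (by omega) k₁ k₂ (by omega) (by omega)]

-- ===== VERDICT (by name: the statement is the Claim_ definition above) =====
theorem reach_target_number_spec : Claim_equal_reach_target_number := by
  intro x _ hpre
  unfold Spec_reach_target_number reach_target_number reach_target_number_alt
  have hfuel : pvMeas x ≤ (2 * x + 3).toNat := by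
    rw [pvMeas_eq x hpre]; split_ifs <;> omega
  rw [rtnLoop_eq_rtnDescend, rtnDescend_stable (pvMeas x) x hpre le_rfl _ _ hfuel le_rfl]
  simp
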